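-- pv_equiv track=rewrite | github.com/QuantumFluxx/HackerRank_solutions | Algorithms/Strings/09. Weighted Uniform Strings.py | get_uniform_subsets
-- ===== SOURCE A (Python) =====
-- from collections import Counter
--
-- def weight_of_letter(l):
--     return ord(l) - 96
--
-- def get_uniform_subsets(s):
--     cnt = Counter()
--     curr = 0
--     last = ""
--     for ch in s:
--         if ch == last:
--             curr += 1
--         else:
--             last = ch
--             curr = 1
--         if curr > cnt[ch]: cnt[ch] = curr
--
--     weights = set()
--     for i in cnt:
--         for j in range(cnt[i]):
--             weights.add((j+1)*weight_of_letter(i))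
--     return weights
-- ===== SOURCE B (Python) =====
-- def weight_of_letter(l):
--     return ord(l) - 96
--
-- def get_uniform_subsets(s):
--     weights = set()
--     seen = set()
--     for ch in s:
--         if ch in seen:
--             continue
--         seen.add(ch)
--         # longest run of ch anywhere in s, found by a dedicated rescan
--         best = run = 0
--         for c in s:
--             run = run + 1 if c == ch else 0
--             if run > best:
--                 best = run
--         w = weight_of_letter(ch)
--         for k in range(1, best + 1):
--             weights.add(k * w)
--     return weights
-- ===== Notes on version B (the rewrite author's own statement) =====
-- stated objective: alternative
-- what changed: B drops A's single-pass Counter state machine entirely: it walks the distinct characters in first-occurrence order (via a seen-set) and, for each new character, rescans the whole string to find that character's longest run, emitting its weight multiples immediately; no dict of max run lengths is ever built.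
import Mathlib
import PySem

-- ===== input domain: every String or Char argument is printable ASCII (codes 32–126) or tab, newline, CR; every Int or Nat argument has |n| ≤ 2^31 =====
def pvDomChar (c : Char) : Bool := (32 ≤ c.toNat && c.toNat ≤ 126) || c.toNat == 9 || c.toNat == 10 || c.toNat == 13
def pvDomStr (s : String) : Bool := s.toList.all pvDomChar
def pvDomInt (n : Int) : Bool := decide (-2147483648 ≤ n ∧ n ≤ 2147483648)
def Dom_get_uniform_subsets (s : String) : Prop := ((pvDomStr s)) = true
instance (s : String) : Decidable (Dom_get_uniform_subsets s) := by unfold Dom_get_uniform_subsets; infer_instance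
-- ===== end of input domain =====

-- B drops A's single-pass Counter state machine: it walks the distinct characters in
-- first-occurrence order (a seen-set) and rescans the whole string per new character for
-- its longest run, emitting that character's weight multiples immediately (objective: alternative).

-- ===== PORT A =====
-- shared module-level helper weight_of_letter(l) = ord(l) - 96
def weight_of_letter (l : Char) : Int := (l.toNat : Int) - 96

-- one iteration of A's 'for ch in s' loop over state (cnt, curr, last)
def stepA (st : PySem.Dict Char Int × Int × String) (ch : Char) :
    PySem.Dict Char Int × Int × String :=
  let (cnt, curr, last) := st
  let (curr, last) :=
    if String.ofList [ch] == last then (curr + 1, last) else ((1 : Int), String.ofList [ch])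
  if curr > cnt.getD ch 0 then (cnt.insert ch curr, curr, last) else (cnt, curr, last)

def get_uniform_subsets (s : String) : List Int :=
  let st := s.toList.foldl stepA (PySem.Dict.empty, (0 : Int), "")
  let cnt := st.1
  cnt.keys.foldl (fun weights i =>
      (PySem.List.pyRange 0 (cnt.getD i 0) 1).foldl
        (fun weights j => PySem.Set.add weights ((j + 1) * weight_of_letter i)) weights)
    PySem.Set.empty

-- ===== PORT B =====
-- inner rescan 'run = run + 1 if c == ch else 0; if run > best: best = run' over state (best, run)
def bRunStep (ch : Char) (br : Int × Int) (c : Char) : Int × Int :=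
  let run := if c == ch then br.2 + 1 else 0
  (if run > br.1 then run else br.1, run)

def get_uniform_subsets_alt (s : String) : List Int :=
  (s.toList.foldl (fun (st : PySem.Set Int × PySem.Set Char) ch =>
      if PySem.Set.contains st.2 ch then st
      else
        let seen := PySem.Set.add st.2 ch
        let best := (s.toList.foldl (bRunStep ch) ((0 : Int), (0 : Int))).1
        let w := weight_of_letter ch
        let weights := (PySem.List.pyRange 1 (best + 1) 1).foldl
            (fun ws k => PySem.Set.add ws (k * w)) st.1
        (weights, seen))
    (PySem.Set.empty, PySem.Set.empty)).1

-- ===== PRECONDITION & SPEC =====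
def Spec_get_uniform_subsets (s : String) (out : List Int) : Prop := out = get_uniform_subsets_alt s
instance (s : String) (out : List Int) : Decidable (Spec_get_uniform_subsets s out) := by unfold Spec_get_uniform_subsets; infer_instance

-- ===== CLAIM =====
def Claim_equal_get_uniform_subsets : Prop := ∀ (s : String), Dom_get_uniform_subsets s → Spec_get_uniform_subsets s (get_uniform_subsets s)

-- ===== LEMMAS AND PROOFS =====

-- proof-side name for B's inner rescan result over a prefix p
def bestRun (p : List Char) (ch : Char) : Int × Int := p.foldl (bRunStep ch) (0, 0)

-- proof-side name for B's emission of one new character's weight multiples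
def emitB (s0 : List Char) (ws : PySem.Set Int) (ch : Char) : PySem.Set Int :=
  (PySem.List.pyRange 1 ((s0.foldl (bRunStep ch) ((0 : Int), (0 : Int))).1 + 1) 1).foldl
    (fun ws k => PySem.Set.add ws (k * weight_of_letter ch)) ws

-- proof-side name for B's outer loop body
def stepB (s0 : List Char) (st : PySem.Set Int × PySem.Set Char) (ch : Char) :
    PySem.Set Int × PySem.Set Char :=
  if PySem.Set.contains st.2 ch then st
  else (emitB s0 st.1 ch, PySem.Set.add st.2 ch)

theorem singleton_beq_false {c x : Char} (h : c ≠ x) :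
    (String.ofList [c] == String.ofList [x]) = false := by
  refine beq_eq_false_iff_ne.mpr fun e => h ?_
  have := congrArg String.toList e
  simpa using this

theorem bestRun_bounds (p : List Char) (ch : Char) :
    0 ≤ (bestRun p ch).2 ∧ (bestRun p ch).2 ≤ (bestRun p ch).1 := by
  suffices h : ∀ (st : Int × Int), 0 ≤ st.2 → st.2 ≤ st.1 →
      0 ≤ (p.foldl (bRunStep ch) st).2 ∧
        (p.foldl (bRunStep ch) st).2 ≤ (p.foldl (bRunStep ch) st).1 by
    exact h (0, 0) le_rfl le_rfl
  induction p with
  | nil => intro st h1 h2; exact ⟨h1, h2⟩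
  | cons c t ih =>
    intro st h1 h2
    simp only [List.foldl_cons]
    apply ih
    · simp only [bRunStep]; split <;> omega
    · simp only [bRunStep]; split <;> split <;> omega

theorem bestRun_append (p : List Char) (x ch : Char) :
    bestRun (p ++ [x]) ch = bRunStep ch (bestRun p ch) x := by
  simp [bestRun, List.foldl_append]

theorem bestRun_not_mem (p : List Char) (x : Char) (h : x ∉ p) : bestRun p x = (0, 0) := by
  induction p using List.reverseRecOn with
  | nil => rfl
  | append_singleton q y ih =>
    have hy : (y == x) = false := beq_eq_false_iff_ne.mpr fun e => h (by simp [e])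
    rw [bestRun_append, ih fun hm => h (by simp [hm])]
    simp [bRunStep, hy]

-- A's loop invariant: the Counter holds each character's best run so far, keys in
-- first-occurrence order, and (curr, last) encode the trailing run.
theorem A_inv (p : List Char) :
    (∀ c, (p.foldl stepA (PySem.Dict.empty, (0 : Int), "")).1.getD c 0 = (bestRun p c).1) ∧
    (p.foldl stepA (PySem.Dict.empty, (0 : Int), "")).1.keys = PySem.Set.ofList p ∧
    (∀ c, (if String.ofList [c] == (p.foldl stepA (PySem.Dict.empty, (0 : Int), "")).2.2
            then (p.foldl stepA (PySem.Dict.empty, (0 : Int), "")).2.1 else 0)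
          = (bestRun p c).2) := by
  induction p using List.reverseRecOn with
  | nil =>
    refine ⟨fun c => ?_, rfl, fun c => ?_⟩
    · simp [bestRun, PySem.Dict.getD_empty]
    · simp only [List.foldl_nil, bestRun, List.foldl_nil]
      split <;> rfl
  | append_singleton p x ih =>
    obtain ⟨hgetD, hkeys, htail⟩ := ih
    set st := p.foldl stepA (PySem.Dict.empty, (0 : Int), "") with hst
    obtain ⟨cnt, curr, last⟩ := st
    have hfold : (p ++ [x]).foldl stepA (PySem.Dict.empty, (0 : Int), "") =
        stepA (cnt, curr, last) x := by
      rw [List.foldl_append, ← hst]; rfl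
    -- r, b : the rescan pair of x over p
    set r := (bestRun p x).2 with hr
    set b := (bestRun p x).1 with hb
    have hcurr : (if String.ofList [x] == last then curr else 0) = r := htail x
    have hgx : cnt.getD x 0 = b := hgetD x
    -- the step in closed form
    have hstep : stepA (cnt, curr, last) x =
        (if r + 1 > b then cnt.insert x (r + 1) else cnt, r + 1, String.ofList [x]) := by
      by_cases hbeq : (String.ofList [x] == last) = true
      · have hlast : last = String.ofList [x] := (eq_of_beq hbeq).symm
        rw [if_pos hbeq] at hcurr
        simp only [stepA, hgx, hcurr, hlast]
        simp
        split <;> rfl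
      · have hbf : (String.ofList [x] == last) = false := by simpa using hbeq
        rw [if_neg (by simp [hbf])] at hcurr
        simp only [stepA, hbf, Bool.false_eq_true, if_false, hgx, ← hcurr, zero_add]
        split <;> rfl
    rw [hfold, hstep]
    -- components of bestRun (p ++ [x]) c
    have hbrx : bestRun (p ++ [x]) x = (if r + 1 > b then r + 1 else b, r + 1) := by
      rw [bestRun_append]
      simp [bRunStep, ← hr, ← hb]
    have hbrc : ∀ c, c ≠ x → bestRun (p ++ [x]) c = ((bestRun p c).1, 0) := by
      intro c hcx
      rw [bestRun_append]
      have hxc : (x == c) = false := beq_eq_false_iff_ne.mpr (Ne.symm hcx)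
      have hbc := bestRun_bounds p c
      simp [bRunStep, hxc]
      omega
    refine ⟨fun c => ?_, ?_, fun c => ?_⟩
    · -- getD clause
      by_cases hcx : c = x
      · subst hcx
        rw [hbrx]
        by_cases hgt : r + 1 > b
        · simp only [if_pos hgt, PySem.Dict.getD_insert_self]
        · simp only [if_neg hgt, hgx]
      · rw [hbrc c hcx]
        by_cases hgt : r + 1 > b
        · simp only [if_pos hgt, PySem.Dict.getD_insert_of_ne _ _ _ hcx, hgetD c]
        · simp only [if_neg hgt, hgetD c]
    · -- keys clause
      have hofl : PySem.Set.ofList (p ++ [x]) = PySem.Set.add (PySem.Set.ofList p) x := by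
        simp [PySem.Set.ofList, List.foldl_append]
      rw [hofl]
      by_cases hmem : x ∈ p
      · have hcont : cnt.contains x = true := by
          rw [PySem.Dict.contains_iff_mem_keys, hkeys]
          exact (PySem.Set.mem_ofList (xs := p) (y := x)).mpr hmem
        have haddeq : PySem.Set.add (PySem.Set.ofList p) x = PySem.Set.ofList p := by
          simp only [PySem.Set.add]
          rw [if_pos]
          simpa [PySem.Set.contains] using (PySem.Set.mem_ofList (xs := p) (y := x)).mpr hmem
        rw [haddeq]
        by_cases hgt : r + 1 > b
        · simp only [if_pos hgt]
          rw [PySem.Dict.keys_insert_of_contains _ _ hcont, hkeys]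
        · simp only [if_neg hgt, hkeys]
      · have h0 : bestRun p x = (0, 0) := bestRun_not_mem p x hmem
        have hr0 : r = 0 := by rw [hr, h0]
        have hb0 : b = 0 := by rw [hb, h0]
        have hgt : r + 1 > b := by omega
        have hcont : cnt.contains x = false := by
          by_contra hcc
          have hct : cnt.contains x = true := by
            cases hcv : cnt.contains x
            · exact absurd hcv hcc
            · rfl
          exact hmem ((PySem.Set.mem_ofList (xs := p) (y := x)).mp
            (hkeys ▸ (PySem.Dict.contains_iff_mem_keys _ _).mp hct))
        have haddeq : PySem.Set.add (PySem.Set.ofList p) x = PySem.Set.ofList p ++ [x] := by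
          simp only [PySem.Set.add]
          rw [if_neg]
          intro hcc
          exact hmem ((PySem.Set.mem_ofList (xs := p) (y := x)).mp
            (by simpa [PySem.Set.contains] using hcc))
        rw [haddeq]
        simp only [if_pos hgt]
        rw [PySem.Dict.keys_insert_of_not_contains _ _ hcont, hkeys]
    · -- trailing-run clause
      by_cases hcx : c = x
      · subst hcx
        rw [hbrx]
        simp
      · rw [hbrc c hcx]
        simp only [singleton_beq_false hcx, Bool.false_eq_true, if_false]

-- Set.update only appends: the old set is a prefix of the updated one
theorem update_suffix {α : Type} [BEq α] (t : List α) :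
    ∀ (s : PySem.Set α), ∃ u, PySem.Set.update s t = s ++ u := by
  induction t with
  | nil => intro s; exact ⟨[], by simp [PySem.Set.update]⟩
  | cons x t ih =>
    intro s
    have hstep : PySem.Set.update s (x :: t) = PySem.Set.update (PySem.Set.add s x) t := rfl
    obtain ⟨u, hu⟩ := ih (PySem.Set.add s x)
    by_cases hc : PySem.Set.add s x = s
    · exact ⟨u, by rw [hstep, hu, hc]⟩
    · refine ⟨x :: u, ?_⟩
      have hax : PySem.Set.add s x = s ++ [x] := by
        simp only [PySem.Set.add] at hc ⊢
        split at hc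
        · exact absurd rfl hc
        · rename_i hb
          rw [if_neg hb]
      rw [hstep, hu, hax, List.append_assoc]
      rfl

-- B's outer loop over a prefix, from an arbitrary (weights, seen) state:
-- it emits exactly the not-yet-seen distinct characters, in order
theorem B_fold (s0 : List Char) (p : List Char) :
    ∀ (ws : PySem.Set Int) (seen : PySem.Set Char),
      p.foldl (stepB s0) (ws, seen) =
        (((PySem.Set.update seen p).drop seen.length).foldl (emitB s0) ws,
          PySem.Set.update seen p) := by
  induction p with
  | nil => intro ws seen; simp [PySem.Set.update]
  | cons x t ih =>
    intro ws seen
    have hupd : PySem.Set.update seen (x :: t) = PySem.Set.update (PySem.Set.add seen x) t := rfl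
    rw [List.foldl_cons, hupd]
    by_cases hc : PySem.Set.contains seen x
    · have hadd : PySem.Set.add seen x = seen := by simp only [PySem.Set.add, hc, if_pos]
      rw [show stepB s0 (ws, seen) x = (ws, seen) by simp only [stepB, hc, if_pos]]
      rw [hadd]
      exact ih ws seen
    · have hcf : PySem.Set.contains seen x = false := by simpa using hc
      have hadd : PySem.Set.add seen x = seen ++ [x] := by
        simp only [PySem.Set.add, hcf]; rfl
      rw [show stepB s0 (ws, seen) x = (emitB s0 ws x, PySem.Set.add seen x) by
            simp only [stepB, hcf]; rfl]
      rw [hadd]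
      rw [ih (emitB s0 ws x) (seen ++ [x])]
      obtain ⟨u, hu⟩ := update_suffix t (seen ++ [x])
      rw [hu]
      congr 1
      · have h1 : List.drop ((seen ++ [x]).length) (seen ++ [x] ++ u) = u :=
          @List.drop_left _ (seen ++ [x]) u
        have h2 : List.drop seen.length (seen ++ [x] ++ u) = x :: u := by
          rw [List.append_assoc]
          exact @List.drop_left _ seen ([x] ++ u)
        rw [h1, h2, List.foldl_cons]

-- A's per-key emission (range(best) with (j+1)*w) equals B's (range(1, best+1) with k*w)
theorem emit_eq (n w : Int) (ws : PySem.Set Int) :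
    (PySem.List.pyRange 0 n 1).foldl (fun ws j => PySem.Set.add ws ((j + 1) * w)) ws
      = (PySem.List.pyRange 1 (n + 1) 1).foldl (fun ws k => PySem.Set.add ws (k * w)) ws := by
  rw [PySem.List.pyRange_one, PySem.List.pyRange_one]
  have h : (n + 1 - 1).toNat = (n - 0).toNat := by omega
  rw [h]
  simp only [List.foldl_map]
  have hf : (fun (ws : PySem.Set Int) (k : Nat) => PySem.Set.add ws ((0 + (k : Int) + 1) * w))
      = fun (ws : PySem.Set Int) (k : Nat) => PySem.Set.add ws ((1 + (k : Int)) * w) := by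
    funext ws k; congr 1; ring
  rw [hf]

-- ===== VERDICT =====
theorem get_uniform_subsets_spec : Claim_equal_get_uniform_subsets := by
  intro s _
  unfold Spec_get_uniform_subsets get_uniform_subsets get_uniform_subsets_alt
  obtain ⟨hgetD, hkeys, -⟩ := A_inv s.toList
  have hB : s.toList.foldl
      (fun (st : PySem.Set Int × PySem.Set Char) ch =>
        if PySem.Set.contains st.2 ch then st
        else
          let seen := PySem.Set.add st.2 ch
          let best := (s.toList.foldl (bRunStep ch) ((0 : Int), (0 : Int))).1
          let w := weight_of_letter ch
          let weights := (PySem.List.pyRange 1 (best + 1) 1).foldl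
              (fun ws k => PySem.Set.add ws (k * w)) st.1
          (weights, seen))
      (PySem.Set.empty, PySem.Set.empty)
      = s.toList.foldl (stepB s.toList) (PySem.Set.empty, PySem.Set.empty) := rfl
  rw [hB, B_fold]
  simp only [hkeys]
  have hfun : (fun (weights : PySem.Set Int) i =>
      (PySem.List.pyRange 0 ((s.toList.foldl stepA (PySem.Dict.empty, (0 : Int), "")).1.getD i 0) 1).foldl
        (fun weights j => PySem.Set.add weights ((j + 1) * weight_of_letter i)) weights)
      = emitB s.toList := by
    funext ws i
    rw [hgetD i, emit_eq]
    rfl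
  rw [hfun]
  rfl
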